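-- pv_equiv track=rewrite | github.com/Samtheman2001/Silver-Crow | utils.py | normalize_speech
-- ===== SOURCE A (Python) =====
-- def normalize_speech(text):
--     if not text or not str(text).strip():
--         return ""
--     s = str(text).strip().lower()
--     out = []
--     for ch in s:
--         if ch.isalnum() or ch.isspace():
--             out.append(ch)
--         else:
--             out.append(" ")
--     return " ".join("".join(out).split())
-- ===== SOURCE B (Python) =====
-- def normalize_speech(text):
--     words = []
--     cur = []
--     for ch in str(text).strip().lower():
--         if ch.isalnum():
--             cur.append(ch)
--         elif cur:
--             words.append("".join(cur))
--             cur = []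
--     if cur:
--         words.append("".join(cur))
--     return " ".join(words)
-- ===== Notes on version B (the rewrite author's own statement) =====
-- stated objective: simpler
-- what changed: Instead of mapping non-alphanumeric characters to spaces and then re-splitting/re-joining the whole string, B tokenizes in one pass: it accumulates runs of alphanumeric characters and flushes them as words, so the guard, the intermediate space-normalized string and the split/join round-trip disappear.
import Mathlib
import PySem

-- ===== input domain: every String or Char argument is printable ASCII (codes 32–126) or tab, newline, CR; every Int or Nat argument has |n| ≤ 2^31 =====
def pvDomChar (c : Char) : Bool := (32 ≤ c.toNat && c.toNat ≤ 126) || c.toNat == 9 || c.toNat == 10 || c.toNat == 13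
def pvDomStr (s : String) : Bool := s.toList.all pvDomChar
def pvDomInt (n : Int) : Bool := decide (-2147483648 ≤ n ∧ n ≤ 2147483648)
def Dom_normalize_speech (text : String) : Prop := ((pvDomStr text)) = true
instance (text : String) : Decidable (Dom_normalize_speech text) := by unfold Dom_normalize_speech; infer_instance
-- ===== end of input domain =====

-- B tokenizes alphanumeric runs in a single pass (no space-substitution string, no split/join round-trip): simpler decomposition, same results.


-- ===== PORT A =====
def normalize_speech (text : String) : String :=
  if text = "" ∨ PySem.Str.strip text = "" then ""
  else
    String.ofList (PySem.Chars.join [' '] (PySem.Chars.split₀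
      ((PySem.Chars.lower (PySem.Chars.strip text.toList)).foldl
        (fun acc ch =>
          if PySem.Chars.isalnum ch || PySem.Chars.isspace ch then acc ++ [ch] else acc ++ [' '])
        ([] : List Char))))

-- ===== PORT B =====
-- loop body of B: grow the current alphanumeric run, or flush it as a word
def nsStep (st : List (List Char) × List Char) (ch : Char) : List (List Char) × List Char :=
  if PySem.Chars.isalnum ch then (st.1, st.2 ++ [ch])
  else if st.2 = [] then st
  else (st.1 ++ [st.2], [])

-- the final flush of a pending run, then " ".join(words)
def nsFinish (st : List (List Char) × List Char) : String :=
  String.ofList (PySem.Chars.join [' '] (if st.2 = [] then st.1 else st.1 ++ [st.2]))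

def normalize_speech_alt (text : String) : String :=
  nsFinish ((PySem.Chars.lower (PySem.Chars.strip text.toList)).foldl nsStep ([], []))

-- ===== PRECONDITION & SPEC =====
def Spec_normalize_speech (text : String) (out : String) : Prop := out = normalize_speech_alt text
instance (text : String) (out : String) : Decidable (Spec_normalize_speech text out) := by unfold Spec_normalize_speech; infer_instance

-- ===== CLAIM (what is proved, stated in full; the proofs are below) =====
def Claim_equal_normalize_speech : Prop := ∀ (text : String), Dom_normalize_speech text → Spec_normalize_speech text (normalize_speech text)

-- ===== LEMMAS AND PROOFS =====
-- the character substitution A applies (proof-side name for A's loop body)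
def nsChar (ch : Char) : Char :=
  if PySem.Chars.isalnum ch || PySem.Chars.isspace ch then ch else ' '

theorem nsChar_alnum_not_space (c : Char) (h : PySem.Chars.isalnum c = true) :
    PySem.Chars.isspace c = false := by
  have hA : 'A'.toNat = 65 := rfl
  have hZ : 'Z'.toNat = 90 := rfl
  have ha : 'a'.toNat = 97 := rfl
  have hz : 'z'.toNat = 122 := rfl
  have h0 : '0'.toNat = 48 := rfl
  have h9 : '9'.toNat = 57 := rfl
  simp only [PySem.Chars.isalnum, PySem.Chars.isalpha, PySem.Chars.isdigit, PySem.Chars.isupper,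
    PySem.Chars.islower, PySem.Chars.isspace, Char.le_def, UInt32.le_iff_toNat_le,
    Bool.or_eq_true, Bool.and_eq_true, decide_eq_true_eq, Bool.or_eq_false_iff,
    Bool.and_eq_false_iff, decide_eq_false_iff_not, not_le] at *
  norm_num at *
  omega

theorem isspace_nsChar (c : Char) :
    PySem.Chars.isspace (nsChar c) = !PySem.Chars.isalnum c := by
  by_cases h : PySem.Chars.isalnum c = true
  · simp [nsChar, h, nsChar_alnum_not_space c h]
  · by_cases hs : PySem.Chars.isspace c = true <;> simp_all [nsChar]; decide

theorem nsChar_of_alnum (c : Char) (h : PySem.Chars.isalnum c = true) : nsChar c = c := by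
  simp [nsChar, h]

theorem out_eq_map (s : List Char) :
    s.foldl
      (fun acc ch =>
        if PySem.Chars.isalnum ch || PySem.Chars.isspace ch then acc ++ [ch] else acc ++ [' '])
      ([] : List Char) = s.map nsChar := by
  have hbody : (fun (acc : List Char) ch =>
      if PySem.Chars.isalnum ch || PySem.Chars.isspace ch then acc ++ [ch] else acc ++ [' '])
      = fun acc ch => acc ++ [nsChar ch] := by
    funext acc ch
    by_cases h1 : PySem.Chars.isalnum ch = true <;>
      by_cases h2 : PySem.Chars.isspace ch = true <;> simp [nsChar, h1, h2]
  rw [hbody]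
  simpa using PySem.List.foldl_append_singleton_eq_map nsChar s

theorem go_eq (s cur : List Char) (acc : List (List Char)) :
    PySem.Chars.split₀.go (s.map nsChar) cur acc =
      (let st := s.foldl nsStep (acc.reverse, cur.reverse)
       if st.2 = [] then st.1 else st.1 ++ [st.2]) := by
  induction s generalizing cur acc with
  | nil =>
      simp only [List.map_nil, PySem.Chars.split₀.go, List.foldl_nil, List.isEmpty_iff]
      by_cases h : cur = [] <;> simp [h]
  | cons c rest ih =>
      by_cases ha : PySem.Chars.isalnum c = true
      · have hs : PySem.Chars.isspace c = false := nsChar_alnum_not_space c ha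
        simp only [List.map_cons, PySem.Chars.split₀.go, nsChar_of_alnum c ha, hs,
          List.foldl_cons, Bool.false_eq_true, if_false]
        have := ih (cur := c :: cur) (acc := acc)
        simpa [nsStep, ha] using this
      · have hs : PySem.Chars.isspace (nsChar c) = true := by simp [isspace_nsChar, ha]
        by_cases hc : cur = []
        · simp only [List.map_cons, PySem.Chars.split₀.go, hs, if_true, hc,
            List.isEmpty_nil, List.foldl_cons]
          have := ih (cur := []) (acc := acc)
          simpa [nsStep, ha, hc] using this
        · simp only [List.map_cons, PySem.Chars.split₀.go, hs, if_true, List.foldl_cons,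
            List.isEmpty_iff, hc, if_false]
          have := ih (cur := []) (acc := cur.reverse :: acc)
          simpa [nsStep, ha, hc] using this

-- ===== VERDICT (by name: the statement is the Claim_ definition above) =====
theorem normalize_speech_spec : Claim_equal_normalize_speech := by
  unfold Claim_equal_normalize_speech
  intro text _
  unfold Spec_normalize_speech normalize_speech normalize_speech_alt
  by_cases hg : text = "" ∨ PySem.Str.strip text = ""
  · have hstrip : PySem.Chars.strip text.toList = [] := by
      rcases hg with h | h
      · subst h; rfl
      · have := congrArg String.toList h
        simpa [PySem.Str.strip] using this
    simp [hg, hstrip, PySem.Chars.lower, PySem.Chars.join, nsFinish]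
    rfl
  · rw [if_neg hg, out_eq_map]
    have := go_eq (PySem.Chars.lower (PySem.Chars.strip text.toList)) [] []
    simp only [List.reverse_nil] at this
    rw [show PySem.Chars.split₀ ((PySem.Chars.lower (PySem.Chars.strip text.toList)).map nsChar)
        = PySem.Chars.split₀.go ((PySem.Chars.lower (PySem.Chars.strip text.toList)).map nsChar) [] []
        from rfl, this]
    rfl
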